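-- pv_equiv track=rewrite | github.com/MarevaZenelaj/DES-HW3 | des.py | randomNumber
-- ===== SOURCE A (Python) =====
-- def randomNumber(lowerLimit, upperLimit,k):
--     seed = 0
--     m = 100
--     a = 21
--     c = 49
--     y = seed
--     list_numbers = {y}
--     for i in range(k):
--         y = (y*a+c) % m
--         list_numbers.add(y)
--     return list_numbers
-- ===== SOURCE B (Python) =====
-- def randomNumber(lowerLimit, upperLimit, k):
--     # Cycle detection: the LCG state is deterministic mod m, so the set stops
--     # growing at the first repeated value; at most m iterations can add anything.
--     m, a, c = 100, 21, 49
--     y = 0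
--     seen = {y}
--     for _ in range(min(k, m)):
--         nxt = (y * a + c) % m
--         if nxt in seen:
--             break
--         seen.add(nxt)
--         y = nxt
--     return seen
-- ===== Notes on version B (the rewrite author's own statement) =====
-- stated objective: faster
-- what changed: B detects the LCG cycle: it stops at the first repeated value (capped at m=100 iterations, the modulus) instead of always running all k iterations, since the set cannot grow after a state repeats.
import Mathlib
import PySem

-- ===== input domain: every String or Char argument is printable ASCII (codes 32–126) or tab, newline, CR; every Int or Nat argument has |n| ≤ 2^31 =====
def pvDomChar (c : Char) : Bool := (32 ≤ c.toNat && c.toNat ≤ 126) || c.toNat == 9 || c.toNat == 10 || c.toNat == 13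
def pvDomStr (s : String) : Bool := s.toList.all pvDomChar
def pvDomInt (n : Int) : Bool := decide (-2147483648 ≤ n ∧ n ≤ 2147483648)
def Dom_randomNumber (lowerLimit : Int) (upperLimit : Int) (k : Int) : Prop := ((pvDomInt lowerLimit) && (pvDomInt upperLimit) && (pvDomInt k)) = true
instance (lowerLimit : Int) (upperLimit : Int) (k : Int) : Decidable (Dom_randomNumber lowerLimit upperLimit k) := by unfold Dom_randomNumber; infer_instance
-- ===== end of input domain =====

-- B stops the LCG loop at the first repeated value (cycle detection, at most m = 100 steps)
-- instead of always running k iterations; objective: faster (O(min(k, m)) instead of O(k)).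

-- ===== PORT A =====
def randomNumber (lowerLimit : Int) (upperLimit : Int) (k : Int) : List Int :=
  let seed : Int := 0
  let m : Int := 100
  let a : Int := 21
  let c : Int := 49
  let st := (PySem.List.pyRange 0 k 1).foldl
    (fun (st : Int × PySem.Set Int) (_ : Int) =>
      let y := PySem.Int.mod (st.1 * a + c) m
      (y, PySem.Set.add st.2 y))
    (seed, PySem.Set.ofList [seed])
  st.2

-- ===== PORT B =====
-- the 'for _ in range(min(k, m)) … break' loop of Source B, fuel = (min k 100).toNat
def altLoop : Nat → Int → PySem.Set Int → PySem.Set Int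
  | 0, _, seen => seen
  | n+1, y, seen =>
    let nxt := PySem.Int.mod (y * 21 + 49) 100
    if PySem.Set.contains seen nxt then seen
    else altLoop n nxt (PySem.Set.add seen nxt)

def randomNumber_alt (lowerLimit : Int) (upperLimit : Int) (k : Int) : List Int :=
  altLoop (min k 100).toNat 0 (PySem.Set.ofList [0])

-- ===== PRECONDITION & SPEC =====
def Spec_randomNumber (lowerLimit : Int) (upperLimit : Int) (k : Int) (out : List Int) : Prop := out = randomNumber_alt lowerLimit upperLimit k
instance (lowerLimit : Int) (upperLimit : Int) (k : Int) (out : List Int) : Decidable (Spec_randomNumber lowerLimit upperLimit k out) := by unfold Spec_randomNumber; infer_instance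

-- ===== CLAIM (what is proved, stated in full; the proofs are below) =====
def Claim_equal_randomNumber : Prop := ∀ (lowerLimit : Int) (upperLimit : Int) (k : Int), Dom_randomNumber lowerLimit upperLimit k → Spec_randomNumber lowerLimit upperLimit k (randomNumber lowerLimit upperLimit k)

-- ===== LEMMAS AND PROOFS =====

-- A's loop body as a single step function (defeq to the fold body of the port of A)
def stepA (st : Int × PySem.Set Int) : Int × PySem.Set Int :=
  let y := PySem.Int.mod (st.1 * 21 + 49) 100
  (y, PySem.Set.add st.2 y)

-- the full set of LCG values, in A's insertion order (all residues mod 100)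
def sFull : List Int := [0, 49, 78, 87, 76, 45, 94, 23, 32, 21, 90, 39, 68, 77, 66, 35, 84, 13, 22, 11, 80, 29, 58, 67, 56, 25, 74, 3, 12, 1, 70, 19, 48, 57, 46, 15, 64, 93, 2, 91, 60, 9, 38, 47, 36, 5, 54, 83, 92, 81, 50, 99, 28, 37, 26, 95, 44, 73, 82, 71, 40, 89, 18, 27, 16, 85, 34, 63, 72, 61, 30, 79, 8, 17, 6, 75, 24, 53, 62, 51, 20, 69, 98, 7, 96, 65, 14, 43, 52, 41, 10, 59, 88, 97, 86, 55, 4, 33, 42, 31]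

lemma foldA (l : List Int) (st : Int × PySem.Set Int) :
    l.foldl
      (fun (st : Int × PySem.Set Int) (_ : Int) =>
        let y := PySem.Int.mod (st.1 * 21 + 49) 100
        (y, PySem.Set.add st.2 y)) st
    = stepA^[l.length] st := by
  induction l generalizing st with
  | nil => rfl
  | cons x xs ih =>
    simp only [List.foldl_cons, List.length_cons, Function.iterate_succ_apply]
    exact ih (stepA st)

lemma memFull (z : Int) (h1 : 0 ≤ z) (h2 : z < 100) : z ∈ sFull := by
  interval_cases z <;> decide

lemma stepA_full (st : Int × PySem.Set Int) (h : st.2 = sFull) : (stepA st).2 = sFull := by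
  have h0 : (0:Int) < 100 := by norm_num
  have hmem : ((st.1 * 21 + 49) % 100) ∈ sFull :=
    memFull _ (Int.emod_nonneg _ (by norm_num)) (Int.emod_lt_of_pos _ h0)
  simp [stepA, PySem.Set.add, h, hmem]

lemma iterA_full (n : Nat) (st : Int × PySem.Set Int) (h : st.2 = sFull) :
    (stepA^[n] st).2 = sFull := by
  induction n generalizing st with
  | zero => simpa using h
  | succ n ih => rw [Function.iterate_succ_apply]; exact ih _ (stepA_full st h)

set_option maxRecDepth 4096 in
lemma stepA_100 : stepA^[100] (0, PySem.Set.ofList [0]) = (0, sFull) := by decide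

set_option maxRecDepth 4096 in
lemma altLoop_100 : altLoop 100 0 (PySem.Set.ofList [0]) = sFull := by decide

set_option maxRecDepth 4096 in
set_option maxHeartbeats 2000000 in
lemma small_case (t : Nat) (h : t ≤ 100) :
    (stepA^[t] (0, PySem.Set.ofList [0])).2 = altLoop t 0 (PySem.Set.ofList [0]) := by
  interval_cases t <;> decide

-- ===== VERDICT (by name: the statement is the Claim_ definition above) =====
theorem randomNumber_spec : Claim_equal_randomNumber := by
  intro l u k _
  show randomNumber l u k = randomNumber_alt l u k
  unfold randomNumber randomNumber_alt
  simp only []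
  rw [foldA, PySem.List.length_pyRange_one]
  have hk0 : (k - 0).toNat = k.toNat := by omega
  rw [hk0]
  by_cases hk : k ≤ 100
  · have hmin : min k 100 = k := min_eq_left hk
    rw [hmin]
    exact small_case k.toNat (by omega)
  · have hmin : (min k 100).toNat = 100 := by omega
    rw [hmin, altLoop_100]
    have hsplit : k.toNat = (k.toNat - 100) + 100 := by omega
    rw [hsplit, Function.iterate_add_apply, stepA_100]
    exact iterA_full _ _ rfl
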